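-- pv_equiv track=rewrite | github.com/darakna/Playground | Pyton_stuff/phone_number.py | rule_two
-- ===== SOURCE A (Python) =====
-- def rule_two(phone_list2):
--     digit_aparition = []
--     for elem in phone_list2:
--         digit_numbers = 0
--         for digit in range(10):
--             if str(digit) in elem:
--                 digit_numbers += 1
--         digit_aparition.append(digit_numbers)
--     returned_list2 = []
--     for counter in range(1, 11):
--         if counter in digit_aparition:
--             for a2 in range(len(phone_list2)):
--                 if digit_aparition[a2] == counter:
--                     returned_list2.append(phone_list2[a2])
--             return returned_list2
-- ===== SOURCE B (Python) =====
-- def rule_two(phone_list2):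
--     counts = [len(set("0123456789") & set(elem)) for elem in phone_list2]
--     positive = [c for c in counts if c >= 1]
--     if not positive:
--         return None
--     target = min(positive)
--     return [elem for elem, c in zip(phone_list2, counts) if c == target]
-- ===== Notes on version B (the rewrite author's own statement) =====
-- stated objective: simpler
-- what changed: Replaces A's per-digit substring loop and its scan of candidate counts 1..10 (with an index re-scan to collect matches) by a set-intersection count per element, a direct min over the positive counts, and one zip/filter comprehension.
import Mathlib
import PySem

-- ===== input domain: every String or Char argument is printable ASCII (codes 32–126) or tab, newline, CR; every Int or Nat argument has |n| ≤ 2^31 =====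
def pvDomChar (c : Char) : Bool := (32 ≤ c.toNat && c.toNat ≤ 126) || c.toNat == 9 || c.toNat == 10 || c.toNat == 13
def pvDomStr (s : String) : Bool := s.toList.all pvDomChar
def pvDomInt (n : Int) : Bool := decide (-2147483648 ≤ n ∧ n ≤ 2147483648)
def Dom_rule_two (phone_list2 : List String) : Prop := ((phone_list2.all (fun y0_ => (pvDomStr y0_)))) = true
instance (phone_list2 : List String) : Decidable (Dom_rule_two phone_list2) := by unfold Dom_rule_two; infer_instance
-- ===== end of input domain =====

-- B replaces A's per-digit membership loop and 1..10 candidate scan by a set-intersection count,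
-- a direct min over the positive counts and one zip/filter pass (objective: simpler).

-- ===== PORT A =====
-- inner collect loop: 'for a2 in range(len(phone_list2)): if digit_aparition[a2] == counter: append'
-- (indices produced by range(len) are always valid, so getD's defaults are never used)
def ruleTwoCollect (phone_list2 : List String) (digit_aparition : List Int) (counter : Int) : List String :=
  (List.range phone_list2.length).foldl
    (fun acc a2 => if digit_aparition.getD a2 0 = counter then acc ++ [phone_list2.getD a2 ""] else acc) []

-- outer loop 'for counter in range(1, 11): if counter in digit_aparition: …; return' (early return)
def ruleTwoLoop (phone_list2 : List String) (digit_aparition : List Int) : List Int → Option (List String)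
  | [] => none
  | counter :: rest =>
      if digit_aparition.contains counter then
        some (ruleTwoCollect phone_list2 digit_aparition counter)
      else ruleTwoLoop phone_list2 digit_aparition rest

def rule_two (phone_list2 : List String) : Option (List String) :=
  let digit_aparition := phone_list2.foldl
    (fun acc elem =>
      acc ++ [(PySem.List.pyRange 0 10 1).foldl
        (fun dn digit => if PySem.Str.isIn (PySem.Int.toStr digit) elem then dn + 1 else dn) (0 : Int)]) []
  ruleTwoLoop phone_list2 digit_aparition (PySem.List.pyRange 1 11 1)

-- ===== PORT B =====
-- len(set("0123456789") & set(elem))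
def countDigitsAlt (elem : String) : Int :=
  ((PySem.Set.inter (PySem.Set.ofList "0123456789".toList) (PySem.Set.ofList elem.toList)).length : Int)

def rule_two_alt (phone_list2 : List String) : Option (List String) :=
  let counts := phone_list2.map countDigitsAlt
  let positive := counts.filter (fun c => decide (1 ≤ c))
  match PySem.List.min? positive (fun x => x) with
  | none => none
  | some t => some ((phone_list2.zip counts).filterMap (fun p => if p.2 = t then some p.1 else none))

-- ===== PRECONDITION & SPEC =====
def Spec_rule_two (phone_list2 : List String) (out : Option (List String)) : Prop := out = rule_two_alt phone_list2
instance (phone_list2 : List String) (out : Option (List String)) : Decidable (Spec_rule_two phone_list2 out) := by unfold Spec_rule_two; infer_instance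

-- ===== CLAIM (what is proved, stated in full; the proofs are below) =====
def Claim_equal_rule_two : Prop := ∀ (phone_list2 : List String), Dom_rule_two phone_list2 → Spec_rule_two phone_list2 (rule_two phone_list2)

-- ===== LEMMAS AND PROOFS =====

-- a one-character substring test is a character-membership test
theorem isIn_single (c : Char) (s sub : String) (h : sub.toList = [c]) :
    PySem.Str.isIn sub s = s.toList.contains c := by
  have hiff := PySem.Str.isIn_iff_infix (sub := sub) (s := s)
  rw [h] at hiff
  have hmem : [c] <:+: s.toList ↔ c ∈ s.toList := by
    constructor
    · intro hi; exact List.singleton_sublist.mp hi.sublist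
    · intro hm
      obtain ⟨l₁, l₂, hsplit⟩ := List.append_of_mem hm
      exact ⟨l₁, l₂, by rw [hsplit]; simp⟩
  by_cases hc : c ∈ s.toList
  · have ht : PySem.Str.isIn sub s = true := hiff.mpr (hmem.mpr hc)
    simp only [ht]
    simp [hc]
  · have hf : PySem.Str.isIn sub s = false :=
      Bool.eq_false_iff.mpr (fun hh => hc (hmem.mp (hiff.mp hh)))
    simp only [hf]
    simp [hc]

-- counting loop = length of filter
theorem foldl_count (l : List Int) (p : Int → Bool) (k : Int) :
    l.foldl (fun dn d => if p d then dn + 1 else dn) k = k + ((l.filter p).length : Int) := by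
  induction l generalizing k with
  | nil => simp
  | cons x t ih =>
      by_cases hx : p x <;> simp [hx, ih] <;> push_cast <;> ring

theorem len_filter_map_eq (l : List Int) (f : Int → Char) (p : Int → Bool) (q : Char → Bool)
    (h : ∀ d ∈ l, p d = q (f d)) :
    (l.filter p).length = ((l.map f).filter q).length := by
  induction l with
  | nil => simp
  | cons x t ih =>
      have hx := h x (by simp)
      by_cases hp : p x <;>
        simp [hp, ← hx, ih (fun d hd => h d (by simp [hd]))]

-- per-element count equality: A's digit loop = B's set-intersection size
theorem count_eq (elem : String) :
    (PySem.List.pyRange 0 10 1).foldl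
      (fun dn digit => if PySem.Str.isIn (PySem.Int.toStr digit) elem then dn + 1 else dn) (0 : Int)
      = countDigitsAlt elem := by
  rw [show PySem.List.pyRange 0 10 1 = [0,1,2,3,4,5,6,7,8,9] from by decide]
  rw [foldl_count]
  have hmap : ([0,1,2,3,4,5,6,7,8,9] : List Int).map (fun d => Char.ofNat (48 + d.toNat))
      = ['0','1','2','3','4','5','6','7','8','9'] := by decide
  have hpoint : ∀ d ∈ ([0,1,2,3,4,5,6,7,8,9] : List Int),
      (PySem.Str.isIn (PySem.Int.toStr d) elem)
        = (fun c => elem.toList.contains c) (Char.ofNat (48 + d.toNat)) := by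
    intro d hd
    fin_cases hd <;>
      [ exact isIn_single '0' elem _ (by decide); exact isIn_single '1' elem _ (by decide);
        exact isIn_single '2' elem _ (by decide); exact isIn_single '3' elem _ (by decide);
        exact isIn_single '4' elem _ (by decide); exact isIn_single '5' elem _ (by decide);
        exact isIn_single '6' elem _ (by decide); exact isIn_single '7' elem _ (by decide);
        exact isIn_single '8' elem _ (by decide); exact isIn_single '9' elem _ (by decide) ]
  rw [len_filter_map_eq _ (fun d => Char.ofNat (48 + d.toNat)) _ (fun c => elem.toList.contains c) hpoint, hmap]
  unfold countDigitsAlt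
  rw [show PySem.Set.ofList "0123456789".toList = ['0','1','2','3','4','5','6','7','8','9'] from by decide]
  simp [PySem.Set.inter]

-- building digit_aparition by append = map
theorem foldl_build_map (ps : List String) (f : String → Int) :
    ps.foldl (fun acc elem => acc ++ [f elem]) [] = ps.map f := by
  rw [PySem.List.foldl_append_singleton_eq_map]
  simp

-- A's collect-by-index loop = zip/filterMap
theorem collect_eq (ps : List String) (ds : List Int) (c : Int) (h : ds.length = ps.length) :
    ruleTwoCollect ps ds c = (ps.zip ds).filterMap (fun p => if p.2 = c then some p.1 else none) := by
  unfold ruleTwoCollect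
  rw [show (fun (acc : List String) (a2 : Nat) => if ds.getD a2 0 = c then acc ++ [ps.getD a2 ""] else acc)
      = (fun acc a2 => if (fun a2 => decide (ds.getD a2 0 = c)) a2 = true then acc ++ [(fun a2 => ps.getD a2 "") a2] else acc)
      from by funext acc a2; simp]
  rw [PySem.List.foldl_append_if]
  simp only [List.nil_append]
  induction ps generalizing ds with
  | nil => simp
  | cons x ps' ih =>
      cases ds with
      | nil => simp at h
      | cons d ds' =>
          have h' : ds'.length = ps'.length := by simpa using h
          rw [List.length_cons, List.range_succ_eq_map]
          have ih' := ih ds' h'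
          simp only [List.getD_eq_getElem?_getD] at ih'
          by_cases hd : d = c <;>
            (simp [hd, List.filter_map, List.map_map, Function.comp_def,
              List.getElem?_cons_succ]; exact ih')

-- the early-return loop finds the first counter present
theorem loop_eq_find (ps : List String) (ds : List Int) (cs : List Int) :
    ruleTwoLoop ps ds cs = (cs.find? (fun c => ds.contains c)).map (ruleTwoCollect ps ds) := by
  induction cs with
  | nil => rfl
  | cons c rest ih =>
      simp only [ruleTwoLoop, List.find?]
      by_cases hc : ds.contains c
      · rw [hc]
        simp
      · have hcf : ds.contains c = false := Bool.eq_false_iff.mpr hc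
        rw [hcf]
        simpa using ih

-- first match on a strictly ascending candidate list is the minimum match
theorem find?_eq_some_min (cs : List Int) (p : Int → Bool) (m : Int)
    (hmem : m ∈ cs) (hp : p m = true) (hmin : ∀ c ∈ cs, p c = true → m ≤ c)
    (hsorted : cs.Pairwise (· < ·)) :
    cs.find? p = some m := by
  induction cs with
  | nil => cases hmem
  | cons c rest ih =>
      rcases List.mem_cons.mp hmem with rfl | hm
      · simp [List.find?, hp]
      · have hcm : c < m := (List.pairwise_cons.mp hsorted).1 m hm
        have hpc : p c = false := by
          by_contra hpc
          have := hmin c (by simp) (by simpa using Bool.of_not_eq_false hpc)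
          omega
        simp [List.find?, hpc]
        exact ih hm (fun d hd hpd => hmin d (by simp [hd]) hpd) (List.pairwise_cons.mp hsorted).2

-- bounds on B's per-element count
theorem countDigitsAlt_bounds (elem : String) : 0 ≤ countDigitsAlt elem ∧ countDigitsAlt elem ≤ 10 := by
  unfold countDigitsAlt
  rw [show PySem.Set.ofList "0123456789".toList = ['0','1','2','3','4','5','6','7','8','9'] from by decide]
  refine ⟨Int.natCast_nonneg _, ?_⟩
  have hle := List.length_filter_le
    (fun x => (PySem.Set.ofList elem.toList).contains x) ['0','1','2','3','4','5','6','7','8','9']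
  simp only [PySem.Set.inter]
  exact_mod_cast le_trans hle (by simp)

-- the candidate scan over 1..10 computes min of the positive counts
theorem find_eq_min (counts : List Int) (hb : ∀ x ∈ counts, 0 ≤ x ∧ x ≤ 10) :
    ([1,2,3,4,5,6,7,8,9,10] : List Int).find? (fun c => counts.contains c)
      = PySem.List.min? (counts.filter (fun c => decide (1 ≤ c))) (fun x => x) := by
  cases hm : PySem.List.min? (counts.filter (fun c => decide (1 ≤ c))) (fun x => x) with
  | none =>
      have hnil := (PySem.List.min?_eq_none_iff _ _).mp hm
      rw [List.find?_eq_none]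
      intro c hc hpc
      have hcm : c ∈ counts := by simpa using hpc
      have h1c : (1 : Int) ≤ c := by fin_cases hc <;> decide
      have : c ∈ counts.filter (fun c => decide (1 ≤ c)) := List.mem_filter.mpr ⟨hcm, by simpa⟩
      simp [hnil] at this
  | some m =>
      have hmem := PySem.List.min?_mem hm
      have hmin := PySem.List.min?_isMin hm
      obtain ⟨hmc, h1m⟩ := List.mem_filter.mp hmem
      have h1m : (1 : Int) ≤ m := by simpa using h1m
      have h10 : m ≤ 10 := (hb m hmc).2
      apply find?_eq_some_min
      · have : m = 1 ∨ m = 2 ∨ m = 3 ∨ m = 4 ∨ m = 5 ∨ m = 6 ∨ m = 7 ∨ m = 8 ∨ m = 9 ∨ m = 10 := by omega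
        rcases this with rfl | rfl | rfl | rfl | rfl | rfl | rfl | rfl | rfl | rfl <;> decide
      · simpa using hmc
      · intro c hcs hpc
        have hcc : c ∈ counts := by simpa using hpc
        have h1c : (1 : Int) ≤ c := by
          simp only [List.mem_cons, List.not_mem_nil, or_false] at hcs; omega
        exact hmin c (List.mem_filter.mpr ⟨hcc, by simpa⟩)
      · decide

-- ===== VERDICT (by name: the statement is the Claim_ definition above) =====
theorem rule_two_spec : Claim_equal_rule_two := by
  intro ps _
  unfold Spec_rule_two rule_two rule_two_alt
  rw [show PySem.List.pyRange 1 11 1 = [1,2,3,4,5,6,7,8,9,10] from by decide]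
  rw [foldl_build_map ps (fun elem => (PySem.List.pyRange 0 10 1).foldl
        (fun dn digit => if PySem.Str.isIn (PySem.Int.toStr digit) elem then dn + 1 else dn) (0 : Int))]
  have hmapeq : ps.map (fun elem => (PySem.List.pyRange 0 10 1).foldl
        (fun dn digit => if PySem.Str.isIn (PySem.Int.toStr digit) elem then dn + 1 else dn) (0 : Int))
      = ps.map countDigitsAlt := List.map_congr_left (fun e _ => count_eq e)
  rw [hmapeq, loop_eq_find]
  rw [find_eq_min (ps.map countDigitsAlt) (by intro x hx; obtain ⟨e, _, rfl⟩ := List.mem_map.mp hx; exact countDigitsAlt_bounds e)]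
  cases hm : PySem.List.min? ((ps.map countDigitsAlt).filter (fun c => decide (1 ≤ c))) (fun x => x) with
  | none => simp only [hm, Option.map_none]
  | some t =>
      simp only [hm]
      simp only [Option.map_some]
      rw [collect_eq ps (ps.map countDigitsAlt) t (by simp)]
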